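-- pv_equiv track=rewrite | github.com/kodsnack/advent_of_code_2019 | estomagordo-python3/day_24a.py | biodiversity
-- ===== SOURCE A (Python) =====
-- def biodiversity(board):
--     score = 0
--
--     for y in range(5):
--         for x in range(5):
--             if board[y][x] != '#':
--                 continue
--             score += 2**(y*5 + x)
--
--     return score
-- ===== SOURCE B (Python) =====
-- def biodiversity(board):
--     s = ''.join('1' if board[y][x] == '#' else '0' for y in range(5) for x in range(5))
--     return int(s[::-1], 2)
-- ===== Notes on version B (the rewrite author's own statement) =====
-- stated objective: idiomatic
-- what changed: B builds the board's bit pattern as a '0'/'1' string in reading order and parses it in one int(s[::-1], 2) conversion instead of accumulating a sum of powers of two cell by cell.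
import Mathlib
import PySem

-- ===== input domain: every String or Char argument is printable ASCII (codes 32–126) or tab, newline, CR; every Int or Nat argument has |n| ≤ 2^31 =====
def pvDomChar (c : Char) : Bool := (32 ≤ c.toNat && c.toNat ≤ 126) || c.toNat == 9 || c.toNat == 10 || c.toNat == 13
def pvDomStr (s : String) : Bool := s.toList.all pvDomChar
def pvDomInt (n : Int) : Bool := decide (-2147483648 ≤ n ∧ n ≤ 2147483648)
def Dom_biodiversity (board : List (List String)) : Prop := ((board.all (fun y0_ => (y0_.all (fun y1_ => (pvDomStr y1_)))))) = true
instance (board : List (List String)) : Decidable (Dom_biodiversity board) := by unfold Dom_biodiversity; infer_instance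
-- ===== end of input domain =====

-- board[y][x]; Python raises IndexError out of range (excluded by Pre_), the port defaults there
def getCell (board : List (List String)) (y x : Int) : String :=
  (PySem.List.pyGet? ((PySem.List.pyGet? board y).getD []) x).getD ""

-- ===== PORT A =====
-- B builds the bit pattern as a '0'/'1' string and parses it once; A sums powers of two (idiomatic rewrite, same cost).
def biodiversity (board : List (List String)) : Int :=
  (PySem.List.pyRange 0 5 1).foldl (fun score y =>
    (PySem.List.pyRange 0 5 1).foldl (fun score x =>
      if getCell board y x ≠ "#" then score
      else score + 2 ^ (y * 5 + x).toNat) score) 0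

-- ===== PORT B =====
-- int(t, 2) for a '0'/'1' string t, ported by hand digit by digit (exact on such strings)
def parseBin (t : List Char) : Int :=
  t.foldl (fun acc c => acc * 2 + (if c = '1' then 1 else 0)) 0

def biodiversity_alt (board : List (List String)) : Int :=
  let s : List Char := (PySem.List.pyRange 0 5 1).flatMap (fun y =>
    (PySem.List.pyRange 0 5 1).map (fun x =>
      if getCell board y x = "#" then '1' else '0'))
  parseBin s.reverse

-- ===== PRECONDITION & SPEC =====
-- Pre_ excludes exactly the boards on which A raises IndexError: fewer than 5 rows, or one of the first 5 rows shorter than 5.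
def Pre_biodiversity (board : List (List String)) : Prop :=
  5 ≤ board.length ∧ ∀ row ∈ board.take 5, 5 ≤ row.length
instance (board : List (List String)) : Decidable (Pre_biodiversity board) := by unfold Pre_biodiversity; infer_instance

def pvWitness_biodiversity : List (List String) :=
  [["#", ".", ".", ".", "#"],
   [".", ".", "#", ".", "."],
   [".", ".", ".", ".", "."],
   ["#", ".", ".", ".", "."],
   [".", ".", ".", ".", "#"]]

def Spec_biodiversity (board : List (List String)) (out : Int) : Prop := out = biodiversity_alt board
instance (board : List (List String)) (out : Int) : Decidable (Spec_biodiversity board out) := by unfold Spec_biodiversity; infer_instance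

-- ===== CLAIM (what is proved, stated in full; the proofs are below) =====
def Claim_equal_biodiversity : Prop := ∀ (board : List (List String)), Dom_biodiversity board → Pre_biodiversity board → Spec_biodiversity board (biodiversity board)

-- ===== LEMMAS AND PROOFS =====

-- A's loop body, abstracted: fold the cells left to right, cell number k contributing 2^k when it is "#"
def sumA (cs : List String) (k : Nat) (acc : Int) : Int :=
  match cs with
  | [] => acc
  | c :: cs => sumA cs (k + 1) (if c ≠ "#" then acc else acc + 2 ^ k)

lemma sumA_append (cs ds : List String) : ∀ (k : Nat) (acc : Int),
    sumA (cs ++ ds) k acc = sumA ds (k + cs.length) (sumA cs k acc) := by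
  induction cs with
  | nil => intro k acc; simp [sumA]
  | cons c cs ih => intro k acc; simp only [List.cons_append, sumA, ih, List.length_cons]; ring_nf

lemma parseBin_reverse_cons (c : Char) (cs : List Char) :
    parseBin (c :: cs).reverse = parseBin cs.reverse * 2 + (if c = '1' then 1 else 0) := by
  simp [parseBin, List.foldl_append]

lemma sumA_eq_parseBin (cs : List String) : ∀ (k : Nat) (acc : Int),
    sumA cs k acc = acc + 2 ^ k * parseBin ((cs.map (fun c => if c = "#" then '1' else '0')).reverse) := by
  induction cs with
  | nil => intro k acc; simp [sumA, parseBin]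
  | cons c cs ih =>
    intro k acc
    simp only [sumA, List.map_cons, parseBin_reverse_cons, ih]
    by_cases h : c = "#" <;> simp [h, pow_succ] <;> ring

-- the inner loop over a range, with a fixed exponent offset b, is sumA of the mapped cells
lemma fold_exp (g : Int → String) (b : Nat) (n : Nat) : ∀ (a hi acc : Int), 0 ≤ a → hi = a + n →
    (PySem.List.pyRange a hi 1).foldl
      (fun score x => if g x ≠ "#" then score else score + 2 ^ (b + x.toNat)) acc
    = sumA ((PySem.List.pyRange a hi 1).map g) (b + a.toNat) acc := by
  induction n with
  | zero =>
    intro a hi acc ha hhi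
    rw [PySem.List.pyRange_one_eq_nil (by omega)]
    simp [sumA]
  | succ n ih =>
    intro a hi acc ha hhi
    have hcons : PySem.List.pyRange a hi 1 = a :: PySem.List.pyRange (a + 1) hi 1 :=
      PySem.List.pyRange_one_cons (by push_cast at hhi; omega)
    rw [hcons]
    simp only [List.foldl_cons, List.map_cons, sumA]
    have := ih (a + 1) hi (if g a ≠ "#" then acc else acc + 2 ^ (b + a.toNat))
      (by omega) (by push_cast at hhi ⊢; omega)
    rw [this, show b + (a + 1).toNat = b + a.toNat + 1 by omega]

-- the whole nested loop of A is sumA of the flattened cell list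
lemma outer_eq (board : List (List String)) (m : Nat) : ∀ (y0 hi acc : Int), 0 ≤ y0 → hi = y0 + m →
    (PySem.List.pyRange y0 hi 1).foldl
      (fun score y => (PySem.List.pyRange 0 5 1).foldl
        (fun score x => if getCell board y x ≠ "#" then score
          else score + 2 ^ (y * 5 + x).toNat) score) acc
    = sumA ((PySem.List.pyRange y0 hi 1).flatMap
        (fun y => (PySem.List.pyRange 0 5 1).map (getCell board y))) ((y0 * 5).toNat) acc := by
  induction m with
  | zero =>
    intro y0 hi acc _ hhi
    rw [PySem.List.pyRange_one_eq_nil (a := y0) (b := hi) (by omega)]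
    simp [sumA]
  | succ m ih =>
    intro y0 hi acc hy hhi
    have hcons : PySem.List.pyRange y0 hi 1 = y0 :: PySem.List.pyRange (y0 + 1) hi 1 :=
      PySem.List.pyRange_one_cons (by push_cast at hhi; omega)
    rw [hcons]
    simp only [List.foldl_cons, List.flatMap_cons]
    -- rewrite the inner exponent (y0*5 + x).toNat into (y0*5).toNat + x.toNat on the range
    have hinner : (PySem.List.pyRange 0 5 1).foldl
        (fun score x => if getCell board y0 x ≠ "#" then score
          else score + 2 ^ (y0 * 5 + x).toNat) acc
        = (PySem.List.pyRange 0 5 1).foldl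
        (fun score x => if getCell board y0 x ≠ "#" then score
          else score + 2 ^ ((y0 * 5).toNat + x.toNat)) acc := by
      apply PySem.List.foldl_congr_mem
      intro s x hx
      obtain ⟨hx1, hx2⟩ := (PySem.List.mem_pyRange_one).mp hx
      rw [show (y0 * 5 + x).toNat = (y0 * 5).toNat + x.toNat by omega]
    have hf := fold_exp (getCell board y0) ((y0 * 5).toNat) 5 0 5 acc le_rfl (by norm_num)
    rw [hinner, hf, sumA_append]
    have hlen : (((PySem.List.pyRange 0 5 1).map (getCell board y0)).length) = 5 := by
      rw [List.length_map, PySem.List.length_pyRange_one]; decide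
    rw [hlen]
    have := ih (y0 + 1) hi (sumA ((PySem.List.pyRange 0 5 1).map (getCell board y0))
      ((y0 * 5).toNat + (0 : Int).toNat) acc) (by omega) (by push_cast at hhi ⊢; omega)
    rw [this, show ((y0 + 1) * 5).toNat = (y0 * 5).toNat + 5 by
      have h5 : (y0 + 1) * 5 = y0 * 5 + 5 := by ring
      omega]
    norm_num

theorem biodiversity_spec : Claim_equal_biodiversity := by
  intro board _ _
  unfold Spec_biodiversity biodiversity biodiversity_alt
  have ho := outer_eq board 5 0 5 0 le_rfl (by norm_num)
  rw [ho, sumA_eq_parseBin]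
  simp only [List.map_flatMap, List.map_map]
  norm_num [Function.comp_def]
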